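-- pv_equiv track=rewrite | github.com/nialov/fractopo | fractopo/tval/executor.py | assemble_error_column
-- ===== SOURCE A (Python) =====
-- def assemble_error_column(original_column, new_columns):
--     """
--     Assembles error column from columns that already exist in GeoDataFrame
--     and columns that are from multi-threaded execution.
--     """
--     assert len(original_column) == len(new_columns[0])
--     mod = []
--     for i in range(len(original_column)):
--         orig_col = original_column[i]
--         for nc in new_columns:
--             orig_col += nc[i]
--         mod.append(orig_col)
--     assert len(mod) == len(original_column)
--     return mod
-- ===== SOURCE B (Python) =====
-- def assemble_error_column(original_column, new_columns):
--     """
--     Assembles error column from columns that already exist in GeoDataFrame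
--     and columns that are from multi-threaded execution.
--     """
--     assert len(original_column) == len(new_columns[0])
--     mod = list(original_column)
--     for nc in new_columns:
--         mod = [acc + addition for acc, addition in zip(mod, nc)]
--     assert len(mod) == len(original_column)
--     return mod
-- ===== Notes on version B (the rewrite author's own statement) =====
-- stated objective: idiomatic
-- what changed: B folds column-major over new_columns, zipping the running accumulator list with each column, instead of A's row-major index loop with an inner scan over all columns per row.
import Mathlib
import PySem

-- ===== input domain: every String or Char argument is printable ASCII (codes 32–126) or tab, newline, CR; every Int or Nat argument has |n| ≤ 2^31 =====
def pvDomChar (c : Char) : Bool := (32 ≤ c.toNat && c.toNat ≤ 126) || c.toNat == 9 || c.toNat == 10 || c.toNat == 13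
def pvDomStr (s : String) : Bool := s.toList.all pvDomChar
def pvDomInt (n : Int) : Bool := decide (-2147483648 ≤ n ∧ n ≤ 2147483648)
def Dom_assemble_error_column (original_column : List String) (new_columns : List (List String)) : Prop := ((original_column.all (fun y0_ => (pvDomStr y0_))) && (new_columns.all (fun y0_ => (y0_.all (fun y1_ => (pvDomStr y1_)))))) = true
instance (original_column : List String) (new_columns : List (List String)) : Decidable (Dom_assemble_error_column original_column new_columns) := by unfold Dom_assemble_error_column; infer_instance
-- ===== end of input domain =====

-- B replaces A's row-major index loop (inner scan over all columns per row) by a column-major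
-- fold zipping the running accumulator list with each new column; same values, same addition order.


-- ===== PORT A =====
-- row-major: for each index i, start from original_column[i] and append every new_columns[j][i]
def assemble_error_column (original_column : List String) (new_columns : List (List String)) : List String :=
  (List.range original_column.length).foldl
    (fun mod i =>
      mod ++ [new_columns.foldl (fun orig_col nc => orig_col ++ nc.getD i "") (original_column.getD i "")])
    []

-- ===== PORT B =====
-- column-major: fold over new_columns, zipping the accumulator list with each column
def assemble_error_column_alt (original_column : List String) (new_columns : List (List String)) : List String :=
  new_columns.foldl (fun mod nc => List.zipWith (fun acc addition => acc ++ addition) mod nc) original_column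

-- ===== PRECONDITION & SPEC =====
-- Pre_ excludes exactly the inputs on which Python A raises: an empty new_columns (IndexError on
-- new_columns[0]), a first column whose length differs from original_column (AssertionError), or
-- any column too short to be indexed at every row (IndexError).
def Pre_assemble_error_column (original_column : List String) (new_columns : List (List String)) : Prop :=
  new_columns ≠ [] ∧ (new_columns.headD []).length = original_column.length ∧
    ∀ nc ∈ new_columns, original_column.length ≤ nc.length
instance (original_column : List String) (new_columns : List (List String)) : Decidable (Pre_assemble_error_column original_column new_columns) := by unfold Pre_assemble_error_column; infer_instance

def pvWitness_assemble_error_column : List String × List (List String) :=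
  (["a", "b"], [["x", "y"], ["1", "2"]])

def Spec_assemble_error_column (original_column : List String) (new_columns : List (List String)) (out : List String) : Prop := out = assemble_error_column_alt original_column new_columns
instance (original_column : List String) (new_columns : List (List String)) (out : List String) : Decidable (Spec_assemble_error_column original_column new_columns out) := by unfold Spec_assemble_error_column; infer_instance

-- ===== CLAIM (what is proved, stated in full; the proofs are below) =====
def Claim_equal_assemble_error_column : Prop := ∀ (original_column : List String) (new_columns : List (List String)), Dom_assemble_error_column original_column new_columns → Pre_assemble_error_column original_column new_columns → Spec_assemble_error_column original_column new_columns (assemble_error_column original_column new_columns)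

-- ===== LEMMAS AND PROOFS =====

-- one zip step: zipping a fully-indexed list with a long-enough column indexes the column
lemma zipWith_step (n : Nat) (g : Nat → String) (nc : List String) (h : n ≤ nc.length) :
    List.zipWith (fun acc addition => acc ++ addition) ((List.range n).map g) nc
      = (List.range n).map (fun i => g i ++ nc.getD i "") := by
  apply List.ext_getElem
  · simp [Nat.min_eq_left h]
  · intro i h1 h2
    simp only [List.getElem_zipWith, List.getElem_map, List.getElem_range]
    have hi : i < nc.length := by simp [Nat.min_eq_left h] at h1; omega
    rw [List.getD_eq_getElem _ _ hi]

-- column-major fold over a fully-indexed accumulator = row-major map of inner folds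
lemma fold_key (n : Nat) (ncs : List (List String)) :
    ∀ g : Nat → String, (∀ nc ∈ ncs, n ≤ nc.length) →
      ncs.foldl (fun mod nc => List.zipWith (fun acc addition => acc ++ addition) mod nc)
          ((List.range n).map g)
        = (List.range n).map (fun i => ncs.foldl (fun s nc => s ++ nc.getD i "") (g i)) := by
  induction ncs with
  | nil => intro g _; simp
  | cons nc rest ih =>
      intro g h
      simp only [List.foldl_cons]
      rw [zipWith_step n g nc (h nc (by simp)),
        ih (fun i => g i ++ nc.getD i "") (fun c hc => h c (by simp [hc]))]

lemma self_eq_range_map (xs : List String) :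
    xs = (List.range xs.length).map (fun i => xs.getD i "") := by
  apply List.ext_getElem
  · simp
  · intro i h1 h2
    simp only [List.getElem_map, List.getElem_range]
    rw [List.getD_eq_getElem _ _ h1]

-- ===== VERDICT (by name: the statement is the Claim_ definition above) =====
theorem assemble_error_column_spec : Claim_equal_assemble_error_column := by
  intro oc ncs _ hpre
  unfold Spec_assemble_error_column assemble_error_column assemble_error_column_alt
  rw [PySem.List.foldl_append_singleton_eq_map, List.nil_append]
  conv_rhs => rw [self_eq_range_map oc]
  rw [fold_key oc.length ncs (fun i => oc.getD i "") hpre.2.2]
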